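-- pv_equiv track=rewrite | github.com/ErToBar2/ORBIT | Orbitv0.98c/orbit/io/importers.py | _identify_coordinate_columns
-- ===== SOURCE A (Python) =====
-- from typing import List, Tuple, Type
--
-- def _identify_coordinate_columns(columns) -> Tuple[str, str, str]:
--     """Identify X, Y, Z coordinate columns from DataFrame columns"""
--     x_col = y_col = z_col = None
--
--     columns_lower = [str(col).lower() for col in columns]
--
--     # Look for X coordinate
--     for i, col in enumerate(columns_lower):
--         if any(keyword in col for keyword in ['x', 'east', 'easting']):
--             x_col = columns[i]
--             break
--
--     # Look for Y coordinate
--     for i, col in enumerate(columns_lower):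
--         if any(keyword in col for keyword in ['y', 'north', 'northing']):
--             y_col = columns[i]
--             break
--
--     # Look for Z coordinate
--     for i, col in enumerate(columns_lower):
--         if any(keyword in col for keyword in ['z', 'elev', 'elevation', 'height', 'alt', 'altitude']):
--             z_col = columns[i]
--             break
--
--     return x_col, y_col, z_col
-- ===== SOURCE B (Python) =====
-- def _identify_coordinate_columns(columns):
--     """Single pass over the columns maintaining three first-match slots."""
--     x_col = y_col = z_col = None
--     for col in columns:
--         low = str(col).lower()
--         if x_col is None and any(k in low for k in ('x', 'east', 'easting')):
--             x_col = col
--         if y_col is None and any(k in low for k in ('y', 'north', 'northing')):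
--             y_col = col
--         if z_col is None and any(k in low for k in ('z', 'elev', 'elevation', 'height', 'alt', 'altitude')):
--             z_col = col
--     return x_col, y_col, z_col
-- ===== Notes on version B (the rewrite author's own statement) =====
-- stated objective: alternative
-- what changed: Replaced A's three separate scans over a precomputed lowercased list with a single pass that lowercases each column once and maintains three first-match slots.
import Mathlib
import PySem

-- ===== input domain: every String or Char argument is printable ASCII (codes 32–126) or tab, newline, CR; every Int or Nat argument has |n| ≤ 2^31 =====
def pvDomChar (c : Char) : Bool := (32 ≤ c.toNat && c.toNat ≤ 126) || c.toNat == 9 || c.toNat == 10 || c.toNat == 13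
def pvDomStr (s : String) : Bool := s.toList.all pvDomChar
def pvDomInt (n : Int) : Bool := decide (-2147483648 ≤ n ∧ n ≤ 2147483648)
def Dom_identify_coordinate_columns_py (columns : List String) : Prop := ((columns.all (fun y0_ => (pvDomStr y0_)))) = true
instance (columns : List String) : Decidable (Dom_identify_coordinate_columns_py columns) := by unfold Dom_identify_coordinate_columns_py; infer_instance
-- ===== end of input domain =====

-- B replaces A's three separate scans (over a precomputed lowercased list) by a single pass
-- that lowercases each column once and maintains three first-match slots (objective: alternative).

-- ===== PORT A =====
-- A's `any(keyword in col for keyword in kws)`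
def pvMatchA (kws : List String) (col : String) : Bool :=
  kws.any (fun k => PySem.Str.isIn k col)

-- A's `for i, col in enumerate(columns_lower): if any(...): result = columns[i]; break`
-- (the paired original/lowered columns walked in order; first match wins)
def pvScanA (pairs : List (String × String)) (kws : List String) : Option String :=
  match pairs with
  | [] => none
  | (orig, low) :: rest => if pvMatchA kws low then some orig else pvScanA rest kws

def identify_coordinate_columns_py (columns : List String) : Option String × Option String × Option String :=
  let columns_lower := columns.map PySem.Str.lower
  let pairs := columns.zip columns_lower
  let x_col := pvScanA pairs ["x", "east", "easting"]
  let y_col := pvScanA pairs ["y", "north", "northing"]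
  let z_col := pvScanA pairs ["z", "elev", "elevation", "height", "alt", "altitude"]
  (x_col, y_col, z_col)

-- ===== PORT B =====
-- B's loop body: lowercase once, fill each still-empty slot independently
def pvStepB (st : Option String × Option String × Option String) (col : String) :
    Option String × Option String × Option String :=
  let low := PySem.Str.lower col
  let x := if st.1.isNone && (["x", "east", "easting"].any (fun k => PySem.Str.isIn k low)) then some col else st.1
  let y := if st.2.1.isNone && (["y", "north", "northing"].any (fun k => PySem.Str.isIn k low)) then some col else st.2.1
  let z := if st.2.2.isNone && (["z", "elev", "elevation", "height", "alt", "altitude"].any (fun k => PySem.Str.isIn k low)) then some col else st.2.2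
  (x, y, z)

def identify_coordinate_columns_py_alt (columns : List String) : Option String × Option String × Option String :=
  columns.foldl pvStepB (none, none, none)

-- ===== PRECONDITION & SPEC =====
def Spec_identify_coordinate_columns_py (columns : List String) (out : Option String × Option String × Option String) : Prop := out = identify_coordinate_columns_py_alt columns
instance (columns : List String) (out : Option String × Option String × Option String) : Decidable (Spec_identify_coordinate_columns_py columns out) := by unfold Spec_identify_coordinate_columns_py; infer_instance

-- ===== CLAIM (what is proved, stated in full; the proofs are below) =====
def Claim_equal_identify_coordinate_columns_py : Prop := ∀ (columns : List String), Dom_identify_coordinate_columns_py columns → Spec_identify_coordinate_columns_py columns (identify_coordinate_columns_py columns)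

-- ===== LEMMAS AND PROOFS =====

-- The single-pass fold from an arbitrary accumulator: each slot keeps its value if already
-- set, otherwise takes the first match of its keyword group among the remaining columns.
theorem pvFold_eq (columns : List String) :
    ∀ (ox oy oz : Option String),
      columns.foldl pvStepB (ox, oy, oz) =
        (ox.or (pvScanA (columns.zip (columns.map PySem.Str.lower)) ["x", "east", "easting"]),
         oy.or (pvScanA (columns.zip (columns.map PySem.Str.lower)) ["y", "north", "northing"]),
         oz.or (pvScanA (columns.zip (columns.map PySem.Str.lower)) ["z", "elev", "elevation", "height", "alt", "altitude"])) := by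
  induction columns with
  | nil =>
      intro ox oy oz
      simp [pvScanA]
  | cons c rest ih =>
      intro ox oy oz
      simp only [List.map_cons, List.zip_cons_cons, List.foldl_cons, pvScanA]
      rw [ih]
      have hstep : pvStepB (ox, oy, oz) c =
          ((if ox.isNone && pvMatchA ["x", "east", "easting"] (PySem.Str.lower c) then some c else ox),
           (if oy.isNone && pvMatchA ["y", "north", "northing"] (PySem.Str.lower c) then some c else oy),
           (if oz.isNone && pvMatchA ["z", "elev", "elevation", "height", "alt", "altitude"] (PySem.Str.lower c) then some c else oz)) := rfl
      rw [hstep]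
      refine Prod.ext ?_ (Prod.ext ?_ ?_)
      · cases ox <;> by_cases h : pvMatchA ["x", "east", "easting"] (PySem.Str.lower c) <;>
          simp [h, Option.or]
      · cases oy <;> by_cases h : pvMatchA ["y", "north", "northing"] (PySem.Str.lower c) <;>
          simp [h, Option.or]
      · cases oz <;> by_cases h : pvMatchA ["z", "elev", "elevation", "height", "alt", "altitude"] (PySem.Str.lower c) <;>
          simp [h, Option.or]

-- ===== VERDICT (by name: the statement is the Claim_ definition above) =====
theorem identify_coordinate_columns_py_spec : Claim_equal_identify_coordinate_columns_py := by
  intro columns _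
  show identify_coordinate_columns_py columns = identify_coordinate_columns_py_alt columns
  simp [identify_coordinate_columns_py, identify_coordinate_columns_py_alt, pvFold_eq]
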